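-- pv_equiv track=rewrite | github.com/sclchuck/MinecraftFTBQuestsTranslation | key2lang.py | _looks_like_number
-- ===== SOURCE A (Python) =====
-- def _looks_like_number(s: str) -> bool:
-- 	# 支持 1 1.2 1.2d 3b 4s 5l 6f
-- 	if not s:
-- 		return False
-- 	body = s[:-1] if s[-1] in "bBsSlLfFdD" else s
-- 	if body.startswith("-"):
-- 		body = body[1:]
-- 	if not body:
-- 		return False
-- 	dot_count = body.count(".")
-- 	if dot_count > 1:
-- 		return False
-- 	return all(ch.isdigit() or ch == "." for ch in body)
-- ===== SOURCE B (Python) =====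
-- _SUFFIXES = "bBsSlLfFdD"
--
-- def _looks_like_number(s: str) -> bool:
--     # single left-to-right scan: optional '-', then a non-empty run of digits
--     # with at most one '.', then an optional type-suffix letter, then end.
--     n = len(s)
--     i = 1 if s.startswith("-") else 0
--     start = i
--     seen_dot = False
--     while i < n:
--         ch = s[i]
--         if ch.isdigit():
--             i += 1
--         elif ch == "." and not seen_dot:
--             seen_dot = True
--             i += 1
--         else:
--             break
--     if i == start:
--         return False
--     if i < n and s[i] in _SUFFIXES:
--         i += 1
--     return i == n
-- ===== Notes on version B (the rewrite author's own statement) =====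
-- stated objective: alternative
-- what changed: Replaced A's slice-the-suffix / strip-the-sign / count-the-dots / all()-scan pipeline (four passes over the string) by a single left-to-right state-machine scan with an index and a seen_dot flag.
import Mathlib
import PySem

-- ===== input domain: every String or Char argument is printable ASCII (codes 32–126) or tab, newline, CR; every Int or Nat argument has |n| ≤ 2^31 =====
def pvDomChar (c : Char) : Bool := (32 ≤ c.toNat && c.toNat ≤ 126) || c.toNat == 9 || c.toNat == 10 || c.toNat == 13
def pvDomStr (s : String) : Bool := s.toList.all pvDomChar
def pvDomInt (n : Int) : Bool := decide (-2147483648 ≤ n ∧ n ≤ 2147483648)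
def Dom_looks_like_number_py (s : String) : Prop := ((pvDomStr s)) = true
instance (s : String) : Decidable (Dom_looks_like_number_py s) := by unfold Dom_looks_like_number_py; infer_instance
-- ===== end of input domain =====

-- B replaces A's four-pass pipeline (suffix slice, sign strip, dot count, all() scan)
-- by a single left-to-right state-machine scan; same results, an alternative algorithm.


-- the literal "bBsSlLfFdD" both Pythons test membership in
def sufChars : List Char := "bBsSlLfFdD".toList

-- ===== PORT A =====
def looks_like_number_py (s : String) : Bool :=
  match s.toList with
  | [] => false                                       -- if not s: return False
  | c :: cs =>
    -- body = s[:-1] if s[-1] in "bBsSlLfFdD" else s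
    let t := c :: cs
    let body := if PySem.Chars.isIn [t.getLast (by simp)] sufChars then t.dropLast else t
    -- if body.startswith("-"): body = body[1:]
    let body := if PySem.Chars.startswith body ['-'] then body.drop 1 else body
    if body.isEmpty then false                        -- if not body: return False
    else
      let dot_count := PySem.Chars.count body ['.']   -- body.count(".")
      if 1 < dot_count then false                     -- if dot_count > 1: return False
      else body.all (fun ch => PySem.Chars.isdigit ch || ch == '.')

-- ===== PORT B =====
def sufCharsB : List Char := "bBsSlLfFdD".toList   -- Source B's _SUFFIXES

-- the while loop of Source B: consume digits / a first '.', return (#consumed, rest)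
def scanCore : List Char → Bool → Nat × List Char
  | [], _ => (0, [])
  | c :: cs, seen =>
    if PySem.Chars.isdigit c then
      let r := scanCore cs seen; (r.1 + 1, r.2)
    else if c == '.' && !seen then
      let r := scanCore cs true; (r.1 + 1, r.2)
    else (0, c :: cs)

def looks_like_number_py_alt (s : String) : Bool :=
  let t := s.toList
  -- i = 1 if s.startswith("-") else 0
  let r := if PySem.Chars.startswith t ['-'] then t.drop 1 else t
  let p := scanCore r false
  if p.1 = 0 then false                               -- if i == start: return False
  else
    match p.2 with                                    -- optional suffix, then i == n
    | [] => true
    | c :: cs => PySem.Chars.isIn [c] sufCharsB && cs.isEmpty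

-- ===== PRECONDITION & SPEC =====
def Spec_looks_like_number_py (s : String) (out : Bool) : Prop := out = looks_like_number_py_alt s
instance (s : String) (out : Bool) : Decidable (Spec_looks_like_number_py s out) := by unfold Spec_looks_like_number_py; infer_instance

-- ===== CLAIM (what is proved, stated in full; the proofs are below) =====
def Claim_equal_looks_like_number_py : Prop := ∀ (s : String), Dom_looks_like_number_py s → Spec_looks_like_number_py s (looks_like_number_py s)

-- ===== LEMMAS AND PROOFS =====

-- Python ch.isdigit() or ch == "."
def goodCh (c : Char) : Bool := PySem.Chars.isdigit c || c == '.'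

-- drop a trailing type-suffix letter
def stripSuf : List Char → List Char
  | [] => []
  | [c] => if PySem.Chars.isIn [c] sufChars then [] else [c]
  | c :: c' :: cs => c :: stripSuf (c' :: cs)

-- drop a leading '-'
def stripSign (l : List Char) : List Char :=
  match l with
  | c :: r => if c = '-' then r else l
  | [] => []

def numTail (l : List Char) (seen : Bool) : Bool :=
  decide (l.count '.' + (if seen then 1 else 0) ≤ 1) && l.all goodCh

def numBody (l : List Char) : Bool := !l.isEmpty && numTail l false

def sufEmpty : List Char → Bool
  | [] => true
  | [c] => PySem.Chars.isIn [c] sufChars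
  | _ => false

theorem count_go_dot (fuel : Nat) (l : List Char) (acc : Nat) (h : l.length ≤ fuel) :
    PySem.Chars.count.go ['.'] fuel l acc = acc + l.count '.' := by
  induction fuel generalizing l acc with
  | zero =>
    cases l with
    | nil => simp [PySem.Chars.count.go]
    | cons c cs => simp at h
  | succ fuel ih =>
    cases l with
    | nil => simp [PySem.Chars.count.go]
    | cons c cs =>
      simp only [PySem.Chars.count.go]
      by_cases hc : c = '.'
      · subst hc
        have : (['.'] : List Char).isPrefixOf ('.' :: cs) = true := by
          simp [List.isPrefixOf]
        rw [if_pos this]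
        simp only [List.length, List.drop]
        rw [ih cs (acc + 1) (by simpa using Nat.le_of_succ_le_succ h)]
        simp
        omega
      · have : (['.'] : List Char).isPrefixOf (c :: cs) = false := by
          simp [List.isPrefixOf]
          exact fun hh => absurd hh.symm hc
        rw [if_neg (by simp [this])]
        rw [ih cs acc (by simpa using Nat.le_of_succ_le_succ h)]
        simp [hc]

theorem count_dot (l : List Char) : PySem.Chars.count l ['.'] = l.count '.' := by
  simp only [PySem.Chars.count]
  rw [if_neg (by simp), count_go_dot l.length l 0 le_rfl]
  omega

theorem sufChars_eq : sufChars = ['b','B','s','S','l','L','f','F','d','D'] := by decide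

theorem memSuf_digit (c : Char) (h : PySem.Chars.isdigit c = true) :
    PySem.Chars.isIn [c] sufChars = false := by
  cases hin : PySem.Chars.isIn [c] sufChars with
  | false => rfl
  | true =>
    exfalso
    have hinf := (PySem.Chars.isIn_iff_infix _ _).1 hin
    have hc : c ∈ sufChars := List.singleton_sublist.1 hinf.sublist
    rw [sufChars_eq] at hc
    simp only [List.mem_cons, List.not_mem_nil, or_false] at hc
    simp only [PySem.Chars.isdigit, Bool.and_eq_true, decide_eq_true_eq] at h
    rcases hc with rfl|rfl|rfl|rfl|rfl|rfl|rfl|rfl|rfl|rfl <;> revert h <;> decide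

theorem digit_ne_dot (c : Char) (h : PySem.Chars.isdigit c = true) : c ≠ '.' := by
  intro hc; subst hc; revert h; decide

-- B's tail check (optional suffix then end) against the scanned rest
theorem sufCharsB_eq : sufCharsB = sufChars := rfl

theorem match_sufEmpty (l : List Char) :
    (match l with
     | [] => true
     | c :: cs => PySem.Chars.isIn [c] sufCharsB && cs.isEmpty) = sufEmpty l := by
  cases l with
  | nil => rfl
  | cons c cs => cases cs <;> simp [sufEmpty, sufCharsB_eq]

theorem scanCore_suffix (cs : List Char) (seen : Bool) :
    sufEmpty (scanCore cs seen).2 = numTail (stripSuf cs) seen := by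
  induction cs generalizing seen with
  | nil => cases seen <;> simp [scanCore, sufEmpty, stripSuf, numTail]
  | cons c cs ih =>
    by_cases hd : PySem.Chars.isdigit c = true
    · rw [show scanCore (c :: cs) seen = (let r := scanCore cs seen; (r.1 + 1, r.2)) by
        simp [scanCore, hd]]
      simp only []
      rw [ih seen]
      cases cs with
      | nil =>
        simp [stripSuf, memSuf_digit c hd, numTail, goodCh, hd, digit_ne_dot c hd]
      | cons c' cs' =>
        simp [stripSuf, numTail, goodCh, hd, digit_ne_dot c hd]
    · by_cases hdot : c = '.' ∧ seen = false
      · obtain ⟨rfl, rfl⟩ := hdot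
        rw [show scanCore ('.' :: cs) false = (let r := scanCore cs true; (r.1 + 1, r.2)) by
          simp [scanCore, hd]]
        simp only []
        rw [ih true]
        cases cs with
        | nil =>
          simp [stripSuf, numTail, goodCh,
                show PySem.Chars.isIn ['.'] sufChars = false by decide]
        | cons c' cs' =>
          simp [stripSuf, numTail, goodCh]
      · have hstop : scanCore (c :: cs) seen = (0, c :: cs) := by
          rcases Decidable.not_and_iff_not_or_not.1 hdot with h | h
          · simp [scanCore, hd, h]
          · have : seen = true := by revert h; cases seen <;> simp
            subst this; simp [scanCore, hd]
        rw [hstop]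
        cases cs with
        | nil =>
          by_cases hin : PySem.Chars.isIn [c] sufChars = true
          · cases seen <;> simp [sufEmpty, hin, stripSuf, numTail]
          · simp only [Bool.not_eq_true] at hin
            simp only [sufEmpty, stripSuf, hin, Bool.false_eq_true, if_false]
            by_cases hc : c = '.'
            · subst hc
              have : seen = true := by
                rcases Decidable.not_and_iff_not_or_not.1 hdot with h | h
                · exact absurd rfl h
                · revert h; cases seen <;> simp
              subst this
              simp [numTail]
            · simp [numTail, goodCh, hd, hc]
        | cons c' cs' =>
          by_cases hc : c = '.'
          · subst hc
            have : seen = true := by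
              rcases Decidable.not_and_iff_not_or_not.1 hdot with h | h
              · exact absurd rfl h
              · revert h; cases seen <;> simp
            subst this
            simp [sufEmpty, stripSuf, numTail]
          · simp [sufEmpty, stripSuf, numTail, goodCh, hd, hc]

-- B after the sign strip equals numBody of the suffix-stripped body
theorem alt_after (r : List Char) :
    (let p := scanCore r false
     if p.1 = 0 then false
     else
       match p.2 with
       | [] => true
       | c :: cs => PySem.Chars.isIn [c] sufCharsB && cs.isEmpty) =
    numBody (stripSuf r) := by
  cases r with
  | nil => simp [scanCore, numBody, stripSuf]
  | cons c cs =>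
    by_cases hd : PySem.Chars.isdigit c = true
    · rw [show scanCore (c :: cs) false = (let r := scanCore cs false; (r.1 + 1, r.2)) by
        simp [scanCore, hd]]
      simp only [Nat.succ_ne_zero, reduceIte]
      rw [match_sufEmpty, scanCore_suffix cs false]
      cases cs with
      | nil =>
        simp [stripSuf, memSuf_digit c hd, numBody, numTail, goodCh, hd, digit_ne_dot c hd]
      | cons c' cs' =>
        simp [stripSuf, numBody, numTail, goodCh, hd, digit_ne_dot c hd]
    · by_cases hc : c = '.'
      · subst hc
        rw [show scanCore ('.' :: cs) false = (let r := scanCore cs true; (r.1 + 1, r.2)) by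
          simp [scanCore, hd]]
        simp only [Nat.succ_ne_zero, reduceIte]
        rw [match_sufEmpty, scanCore_suffix cs true]
        cases cs with
        | nil =>
          simp [stripSuf, numBody, numTail, goodCh,
                show PySem.Chars.isIn ['.'] sufChars = false by decide]
        | cons c' cs' =>
          simp [stripSuf, numBody, numTail, goodCh]
      · have hstop : scanCore (c :: cs) false = (0, c :: cs) := by
          simp [scanCore, hd, hc]
        rw [hstop]
        simp only [reduceIte]
        cases cs with
        | nil =>
          by_cases hin : PySem.Chars.isIn [c] sufChars = true
          · simp [stripSuf, hin, numBody]
          · simp only [Bool.not_eq_true] at hin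
            simp [stripSuf, hin, numBody, numTail, goodCh, hd, hc]
        | cons c' cs' =>
          simp [stripSuf, numBody, numTail, goodCh, hd, hc]

theorem startswith_sign (l : List Char) :
    (if PySem.Chars.startswith l ['-'] then l.drop 1 else l) = stripSign l := by
  cases l with
  | nil => simp [PySem.Chars.startswith, stripSign, List.isPrefixOf]
  | cons c cs =>
    by_cases hc : c = '-'
    · subst hc; simp [PySem.Chars.startswith, List.isPrefixOf, stripSign]
    · simp [PySem.Chars.startswith, List.isPrefixOf, stripSign, hc]
      intro h; exact absurd h.symm hc

theorem alt_eq (s : String) :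
    looks_like_number_py_alt s = numBody (stripSuf (stripSign s.toList)) := by
  simp only [looks_like_number_py_alt, startswith_sign]
  exact alt_after (stripSign s.toList)

theorem stripSuf_eq (t : List Char) (h : t ≠ []) :
    (if PySem.Chars.isIn [t.getLast h] sufChars then t.dropLast else t) = stripSuf t := by
  induction t with
  | nil => exact absurd rfl h
  | cons c cs ih =>
    cases cs with
    | nil => simp [stripSuf, List.getLast]
    | cons c' cs' =>
      have hne : c' :: cs' ≠ [] := by simp
      rw [show (c :: c' :: cs').getLast (by simp) = (c' :: cs').getLast hne by
        simp [List.getLast]]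
      rw [show (c :: c' :: cs').dropLast = c :: (c' :: cs').dropLast by simp]
      rw [show stripSuf (c :: c' :: cs') = c :: stripSuf (c' :: cs') from rfl]
      rw [← ih hne]
      by_cases hin : PySem.Chars.isIn [(c' :: cs').getLast hne] sufChars = true
      · simp [hin]
      · simp only [Bool.not_eq_true] at hin; simp [hin]

theorem a_eq (s : String) :
    looks_like_number_py s = numBody (stripSign (stripSuf s.toList)) := by
  unfold looks_like_number_py
  cases ht : s.toList with
  | nil => simp [stripSuf, stripSign, numBody]
  | cons c cs =>
    simp only []
    rw [stripSuf_eq (c :: cs) (by simp), startswith_sign]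
    set b := stripSign (stripSuf (c :: cs)) with hb
    rw [count_dot]
    unfold numBody numTail
    cases hbe : b.isEmpty
    · simp only [Bool.false_eq_true, if_false, Bool.not_false, Bool.true_and]
      by_cases hlt : 1 < b.count '.'
      · simp [hlt]
      · simp only [hlt, if_false]
        simp only [show b.count '.' + 0 ≤ 1 by omega, decide_true, Bool.true_and]
        rfl
    · simp

-- ===== VERDICT (by name: the statement is the Claim_ definition above) =====
theorem looks_like_number_py_spec : Claim_equal_looks_like_number_py := by
  intro s _
  unfold Spec_looks_like_number_py
  rw [a_eq, alt_eq]
  have comm : ∀ l : List Char, stripSign (stripSuf l) = stripSuf (stripSign l) := by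
    intro l
    cases l with
    | nil => rfl
    | cons c cs =>
      by_cases hc : c = '-'
      · subst hc
        cases cs with
        | nil => decide
        | cons c' cs' => simp [stripSuf, stripSign]
      · cases cs with
        | nil =>
          by_cases hin : PySem.Chars.isIn [c] sufChars = true
          · simp [stripSuf, hin, stripSign, hc]
          · simp only [Bool.not_eq_true] at hin
            simp [stripSuf, hin, stripSign, hc]
        | cons c' cs' => simp [stripSuf, stripSign, hc]
  rw [comm]
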